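-- pv_equiv track=rewrite | github.com/Shidowy/HarderLeetcodeProblems | 3DRainWater/solution/simplest.py | trap_water_3d_simple
-- ===== SOURCE A (Python) =====
-- def trap_water_3d_simple(terrain):
--     # Get the dimensions of the terrain
--     N = len(terrain)
--     M = len(terrain[0])
--     P = len(terrain[0][0])
--
--     trapped_water = 0
--
--     # Directions for the 6 possible neighbors (up, down, left, right, front, back)
--     directions = [(-1, 0, 0), (1, 0, 0), (0, -1, 0), (0, 1, 0), (0, 0, -1), (0, 0, 1)]
--
--     # Check each cell (i, j, k) inside the grid
--     for i in range(1, N-1):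
--         for j in range(1, M-1):
--             for k in range(1, P-1):
--                 # Find the maximum height among the neighbors (up, down, left, right, front, back)
--                 max_height = terrain[i][j][k]
--
--                 for di, dj, dk in directions:
--                     ni, nj, nk = i + di, j + dj, k + dk
--                     max_height = max(max_height, terrain[ni][nj][nk])
--
--                 # Calculate trapped water if the current cell is lower than its surrounding neighbors
--                 if terrain[i][j][k] < max_height:
--                     trapped_water += max_height - terrain[i][j][k]
--
--     return trapped_water
-- ===== SOURCE B (Python) =====
-- def trap_water_3d_simple(terrain):
--     # Two-phase decomposition: build a neighbor-max table direction by direction,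
--     # then sum the differences over the interior in a separate pass.
--     N = len(terrain)
--     M = len(terrain[0])
--     P = len(terrain[0][0])
--
--     best = [[list(row) for row in plane] for plane in terrain]
--
--     for di, dj, dk in [(-1, 0, 0), (1, 0, 0), (0, -1, 0), (0, 1, 0), (0, 0, -1), (0, 0, 1)]:
--         best = [[[max(best[i][j][k], terrain[i + di][j + dj][k + dk])
--                   if 1 <= i < N - 1 and 1 <= j < M - 1 and 1 <= k < P - 1
--                   else best[i][j][k]
--                   for k in range(len(best[i][j]))]
--                  for j in range(len(best[i]))]
--                 for i in range(len(best))]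
--
--     total = 0
--     for i in range(1, N - 1):
--         for j in range(1, M - 1):
--             for k in range(1, P - 1):
--                 total += best[i][j][k] - terrain[i][j][k]
--     return total
-- ===== Notes on version B (the rewrite author's own statement) =====
-- stated objective: alternative
-- what changed: A fuses everything into one per-cell scan that computes each cell's 7-point max and adds the difference on the spot; B first builds a whole neighbor-max table by relaxing it once per direction (direction-major passes) and then sums table-minus-terrain over the interior in a separate second phase.
import Mathlib
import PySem

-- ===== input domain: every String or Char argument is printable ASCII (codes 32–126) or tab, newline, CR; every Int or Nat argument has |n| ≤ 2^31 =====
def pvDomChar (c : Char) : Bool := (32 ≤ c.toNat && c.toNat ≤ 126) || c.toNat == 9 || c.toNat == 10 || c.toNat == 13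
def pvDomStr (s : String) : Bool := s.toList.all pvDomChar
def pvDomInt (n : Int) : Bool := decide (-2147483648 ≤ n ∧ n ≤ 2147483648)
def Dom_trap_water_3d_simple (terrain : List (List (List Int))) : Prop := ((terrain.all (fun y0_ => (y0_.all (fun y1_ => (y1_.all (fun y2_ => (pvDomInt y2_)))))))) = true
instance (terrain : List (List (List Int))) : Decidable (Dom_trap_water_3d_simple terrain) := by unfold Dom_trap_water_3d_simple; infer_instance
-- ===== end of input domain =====

-- B replaces A's fused per-cell scan by a two-phase decomposition (relax a neighbor-max
-- table over the six directions, then sum the differences); objective: alternative.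

-- terrain[i][j][k] with a default (used by both ports; Pre_ keeps every used access in range)
def pvGet3 (t : List (List (List Int))) (i j k : Int) : Int :=
  PySem.List.pyGetD (PySem.List.pyGetD (PySem.List.pyGetD t i []) j []) k 0

-- ===== PORT A =====
def trap_water_3d_simple (terrain : List (List (List Int))) : Int :=
  let N : Int := terrain.length
  let M : Int := (PySem.List.pyGetD terrain 0 []).length
  let P : Int := (PySem.List.pyGetD (PySem.List.pyGetD terrain 0 []) 0 []).length
  let directions : List (Int × Int × Int) :=
    [(-1, 0, 0), (1, 0, 0), (0, -1, 0), (0, 1, 0), (0, 0, -1), (0, 0, 1)]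
  (PySem.List.pyRange 1 (N - 1) 1).foldl (fun acc i =>
    (PySem.List.pyRange 1 (M - 1) 1).foldl (fun acc j =>
      (PySem.List.pyRange 1 (P - 1) 1).foldl (fun acc k =>
        let maxHeight := directions.foldl
          (fun mh d => max mh (pvGet3 terrain (i + d.1) (j + d.2.1) (k + d.2.2)))
          (pvGet3 terrain i j k)
        if pvGet3 terrain i j k < maxHeight then acc + (maxHeight - pvGet3 terrain i j k)
        else acc) acc) acc) 0

-- ===== PORT B =====
-- one direction-relaxation pass (the triple comprehension of Source B)
def pvRelax (terrain : List (List (List Int))) (N M P : Int)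
    (best : List (List (List Int))) (d : Int × Int × Int) : List (List (List Int)) :=
  (PySem.List.pyRange 0 (best.length : Int) 1).map (fun i =>
    (PySem.List.pyRange 0 ((PySem.List.pyGetD best i []).length : Int) 1).map (fun j =>
      (PySem.List.pyRange 0 ((PySem.List.pyGetD (PySem.List.pyGetD best i []) j []).length : Int) 1).map (fun k =>
        if 1 ≤ i ∧ i < N - 1 ∧ 1 ≤ j ∧ j < M - 1 ∧ 1 ≤ k ∧ k < P - 1 then
          max (pvGet3 best i j k) (pvGet3 terrain (i + d.1) (j + d.2.1) (k + d.2.2))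
        else pvGet3 best i j k)))

def trap_water_3d_simple_alt (terrain : List (List (List Int))) : Int :=
  let N : Int := terrain.length
  let M : Int := (PySem.List.pyGetD terrain 0 []).length
  let P : Int := (PySem.List.pyGetD (PySem.List.pyGetD terrain 0 []) 0 []).length
  let best0 := terrain.map (fun plane => plane.map (fun row => row))
  let best := [((-1 : Int), (0 : Int), (0 : Int)), (1, 0, 0), (0, -1, 0), (0, 1, 0), (0, 0, -1), (0, 0, 1)].foldl
    (pvRelax terrain N M P) best0
  (PySem.List.pyRange 1 (N - 1) 1).foldl (fun acc i =>
    (PySem.List.pyRange 1 (M - 1) 1).foldl (fun acc j =>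
      (PySem.List.pyRange 1 (P - 1) 1).foldl (fun acc k =>
        acc + (pvGet3 best i j k - pvGet3 terrain i j k)) acc) acc) 0

-- ===== PRECONDITION & SPEC =====
-- every cell with at least two interior coordinates (= every cell of the 7-point stencil
-- of some interior cell, i.e. every cell A reads in its loops) exists
def pvStencilOK (t : List (List (List Int))) : Bool :=
  (List.range t.length).all fun i =>
    (List.range (t.getD 0 []).length).all fun j =>
      (List.range ((t.getD 0 []).getD 0 []).length).all fun k =>
        !((decide (1 ≤ i) && decide (i + 2 ≤ t.length) &&
           decide (1 ≤ j) && decide (j + 2 ≤ (t.getD 0 []).length)) ||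
          (decide (1 ≤ i) && decide (i + 2 ≤ t.length) &&
           decide (1 ≤ k) && decide (k + 2 ≤ ((t.getD 0 []).getD 0 []).length)) ||
          (decide (1 ≤ j) && decide (j + 2 ≤ (t.getD 0 []).length) &&
           decide (1 ≤ k) && decide (k + 2 ≤ ((t.getD 0 []).getD 0 []).length))) ||
        (decide (j < (t.getD i []).length) && decide (k < ((t.getD i []).getD j []).length))

-- Pre_ is exactly where the Python A returns (no IndexError): terrain[0] and terrain[0][0]
-- exist, and when the interior loops run at all every access of A's 7-point stencil is in range.
def Pre_trap_water_3d_simple (terrain : List (List (List Int))) : Prop :=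
  terrain ≠ [] ∧ terrain.getD 0 [] ≠ [] ∧
  (3 ≤ terrain.length ∧ 3 ≤ (terrain.getD 0 []).length ∧
      3 ≤ ((terrain.getD 0 []).getD 0 []).length →
    pvStencilOK terrain = true)
instance (terrain : List (List (List Int))) : Decidable (Pre_trap_water_3d_simple terrain) := by
  unfold Pre_trap_water_3d_simple; infer_instance

def pvWitness_trap_water_3d_simple : List (List (List Int)) :=
  [[[0, 0, 0], [0, 0, 0], [0, 0, 0]],
   [[0, 0, 0], [0, 9, 0], [0, 0, 0]],
   [[0, 0, 0], [0, 0, 0], [0, 0, 0]]]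

def Spec_trap_water_3d_simple (terrain : List (List (List Int))) (out : Int) : Prop := out = trap_water_3d_simple_alt terrain
instance (terrain : List (List (List Int))) (out : Int) : Decidable (Spec_trap_water_3d_simple terrain out) := by unfold Spec_trap_water_3d_simple; infer_instance

-- ===== CLAIM (what is proved, stated in full; the proofs are below) =====
def Claim_equal_trap_water_3d_simple : Prop := ∀ (terrain : List (List (List Int))), Dom_trap_water_3d_simple terrain → Pre_trap_water_3d_simple terrain → Spec_trap_water_3d_simple terrain (trap_water_3d_simple terrain)

-- ===== LEMMAS AND PROOFS =====

-- s has the same 3-D shape as t (lengths at every level, at indices valid in t)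
def pvSh (s t : List (List (List Int))) : Prop :=
  s.length = t.length ∧
  ∀ i : Int, 0 ≤ i → i < (t.length : Int) →
    (PySem.List.pyGetD s i []).length = (PySem.List.pyGetD t i []).length ∧
    ∀ j : Int, 0 ≤ j → j < ((PySem.List.pyGetD t i []).length : Int) →
      (PySem.List.pyGetD (PySem.List.pyGetD s i []) j []).length =
        (PySem.List.pyGetD (PySem.List.pyGetD t i []) j []).length

theorem pvSh_refl (t : List (List (List Int))) : pvSh t t := by
  refine ⟨rfl, fun i _ _ => ⟨rfl, fun j _ _ => rfl⟩⟩

theorem pvRelax_get3 (t : List (List (List Int))) (N M P : Int)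
    (s : List (List (List Int))) (d : Int × Int × Int) (i j k : Int)
    (hi0 : 0 ≤ i) (hi : i < (s.length : Int))
    (hj0 : 0 ≤ j) (hj : j < ((PySem.List.pyGetD s i []).length : Int))
    (hk0 : 0 ≤ k) (hk : k < ((PySem.List.pyGetD (PySem.List.pyGetD s i []) j []).length : Int)) :
    pvGet3 (pvRelax t N M P s d) i j k =
      if 1 ≤ i ∧ i < N - 1 ∧ 1 ≤ j ∧ j < M - 1 ∧ 1 ≤ k ∧ k < P - 1 then
        max (pvGet3 s i j k) (pvGet3 t (i + d.1) (j + d.2.1) (k + d.2.2))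
      else pvGet3 s i j k := by
  unfold pvRelax pvGet3
  rw [PySem.List.pyGetD_map_pyRange_of_nonneg _ _ _ _ hi0 hi,
      PySem.List.pyGetD_map_pyRange_of_nonneg _ _ _ _ hj0 hj,
      PySem.List.pyGetD_map_pyRange_of_nonneg _ _ _ _ hk0 hk]

theorem pvRelax_sh (t t' : List (List (List Int))) (N M P : Int)
    (s : List (List (List Int))) (d : Int × Int × Int)
    (hsh : pvSh s t') : pvSh (pvRelax t N M P s d) t' := by
  obtain ⟨h1, h2⟩ := hsh
  refine ⟨?_, fun i hi0 hi => ?_⟩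
  · simp [pvRelax, PySem.List.length_pyRange_one, h1]
  · have hi' : i < (s.length : Int) := by rw [h1]; exact hi
    have hrow : PySem.List.pyGetD (pvRelax t N M P s d) i [] =
        (PySem.List.pyRange 0 ((PySem.List.pyGetD s i []).length : Int) 1).map (fun j =>
          (PySem.List.pyRange 0 ((PySem.List.pyGetD (PySem.List.pyGetD s i []) j []).length : Int) 1).map (fun k =>
            if 1 ≤ i ∧ i < N - 1 ∧ 1 ≤ j ∧ j < M - 1 ∧ 1 ≤ k ∧ k < P - 1 then
              max (pvGet3 s i j k) (pvGet3 t (i + d.1) (j + d.2.1) (k + d.2.2))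
            else pvGet3 s i j k)) := by
      unfold pvRelax
      rw [PySem.List.pyGetD_map_pyRange_of_nonneg _ _ _ _ hi0 hi']
    refine ⟨?_, fun j hj0 hj => ?_⟩
    · rw [hrow]
      simp [PySem.List.length_pyRange_one, (h2 i hi0 hi).1]
    · have hj' : j < ((PySem.List.pyGetD s i []).length : Int) := by
        rw [(h2 i hi0 hi).1]; exact hj
      rw [hrow, PySem.List.pyGetD_map_pyRange_of_nonneg _ _ _ _ hj0 hj']
      simp [PySem.List.length_pyRange_one, (h2 i hi0 hi).2 j hj0 hj]

theorem pvSh_get3_relax (t t' : List (List (List Int))) (N M P : Int)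
    (s : List (List (List Int))) (d : Int × Int × Int) (i j k : Int)
    (hsh : pvSh s t')
    (hi0 : 0 ≤ i) (hi : i < (t'.length : Int))
    (hj0 : 0 ≤ j) (hj : j < ((PySem.List.pyGetD t' i []).length : Int))
    (hk0 : 0 ≤ k) (hk : k < ((PySem.List.pyGetD (PySem.List.pyGetD t' i []) j []).length : Int))
    (hint : 1 ≤ i ∧ i < N - 1 ∧ 1 ≤ j ∧ j < M - 1 ∧ 1 ≤ k ∧ k < P - 1) :
    pvGet3 (pvRelax t N M P s d) i j k =
      max (pvGet3 s i j k) (pvGet3 t (i + d.1) (j + d.2.1) (k + d.2.2)) := by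
  rw [pvRelax_get3 t N M P s d i j k hi0 (by rw [hsh.1]; exact hi)
      hj0 (by rw [(hsh.2 i hi0 hi).1]; exact hj)
      hk0 (by rw [(hsh.2 i hi0 hi).2 j hj0 hj]; exact hk)]
  simp [hint]

theorem pvIteDiff (c m acc : Int) (hcm : c ≤ m) :
    (if c < m then acc + (m - c) else acc) = acc + (m - c) := by
  split_ifs with h
  · rfl
  · omega

theorem pvPre_valid (t : List (List (List Int)))
    (hst : 3 ≤ t.length ∧ 3 ≤ (t.getD 0 []).length ∧ 3 ≤ ((t.getD 0 []).getD 0 []).length →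
      pvStencilOK t = true) (i j k : Int)
    (hi1 : 1 ≤ i) (hi2 : i < (t.length : Int) - 1)
    (hj1 : 1 ≤ j) (hj2 : j < ((t.getD 0 []).length : Int) - 1)
    (hk1 : 1 ≤ k) (hk2 : k < (((t.getD 0 []).getD 0 []).length : Int) - 1) :
    0 ≤ i ∧ i < (t.length : Int) ∧ 0 ≤ j ∧ j < ((PySem.List.pyGetD t i []).length : Int) ∧
      0 ≤ k ∧ k < ((PySem.List.pyGetD (PySem.List.pyGetD t i []) j []).length : Int) := by
  have hall := hst ⟨by omega, by omega, by omega⟩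
  unfold pvStencilOK at hall
  simp only [List.all_eq_true, List.mem_range] at hall
  have hi0 : 0 ≤ i := by omega
  have hj0 : 0 ≤ j := by omega
  have hk0 : 0 ≤ k := by omega
  have hii : i = (i.toNat : Int) := (Int.toNat_of_nonneg hi0).symm
  have hjj : j = (j.toNat : Int) := (Int.toNat_of_nonneg hj0).symm
  have hkk : k = (k.toNat : Int) := (Int.toNat_of_nonneg hk0).symm
  have h := hall i.toNat (by omega) j.toNat (by omega) k.toNat (by omega)
  simp only [Bool.or_eq_true, Bool.and_eq_true, Bool.not_eq_true', Bool.or_eq_false_iff,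
    Bool.and_eq_false_iff, decide_eq_true_eq, decide_eq_false_iff_not] at h
  have hmain : j.toNat < (t.getD i.toNat []).length ∧
      k.toNat < ((t.getD i.toNat []).getD j.toNat []).length := by
    rcases h with h | h
    · exfalso; revert h; omega
    · exact h
  rw [hii, hjj, hkk]
  simp only [PySem.List.pyGetD_natCast]
  refine ⟨by omega, by omega, by omega, by exact_mod_cast hmain.1, by omega,
    by exact_mod_cast hmain.2⟩

-- ===== VERDICT (by name: the statement is the Claim_ definition above) =====
theorem trap_water_3d_simple_spec : Claim_equal_trap_water_3d_simple := by
  intro terrain _ hPre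
  obtain ⟨hne, hne0, hstencil⟩ := hPre
  unfold Spec_trap_water_3d_simple trap_water_3d_simple trap_water_3d_simple_alt
  dsimp only
  simp only [List.map_id']
  simp only [PySem.List.pyGetD_zero]
  set NN : Int := (terrain.length : Int) with hNN
  set MM : Int := ((terrain.getD 0 []).length : Int) with hMM
  set PP : Int := (((terrain.getD 0 []).getD 0 []).length : Int) with hPP
  apply PySem.List.foldl_congr_mem; intro acc i hi
  apply PySem.List.foldl_congr_mem; intro acc2 j hj
  apply PySem.List.foldl_congr_mem; intro acc3 k hk
  rw [PySem.List.mem_pyRange_one] at hi hj hk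
  obtain ⟨hv_i0, hv_i, hv_j0, hv_j, hv_k0, hv_k⟩ :=
    pvPre_valid terrain hstencil i j k hi.1 hi.2 hj.1 hj.2 hk.1 hk.2
  have hint : 1 ≤ i ∧ i < NN - 1 ∧ 1 ≤ j ∧ j < MM - 1 ∧ 1 ≤ k ∧ k < PP - 1 :=
    ⟨hi.1, hi.2, hj.1, hj.2, hk.1, hk.2⟩
  have sh0 := pvSh_refl terrain
  have sh1 := pvRelax_sh terrain terrain NN MM PP terrain ((-1, 0, 0) : Int × Int × Int) sh0
  have sh2 := pvRelax_sh terrain terrain NN MM PP _ ((1, 0, 0) : Int × Int × Int) sh1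
  have sh3 := pvRelax_sh terrain terrain NN MM PP _ ((0, -1, 0) : Int × Int × Int) sh2
  have sh4 := pvRelax_sh terrain terrain NN MM PP _ ((0, 1, 0) : Int × Int × Int) sh3
  have sh5 := pvRelax_sh terrain terrain NN MM PP _ ((0, 0, -1) : Int × Int × Int) sh4
  have hle := (PySem.List.le_foldl_max_int
    ([(-1, 0, 0), (1, 0, 0), (0, -1, 0), (0, 1, 0), (0, 0, -1), (0, 0, 1)] : List (Int × Int × Int))
    (fun d => pvGet3 terrain (i + d.1) (j + d.2.1) (k + d.2.2)) (pvGet3 terrain i j k)).1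
  have hbest : pvGet3 (List.foldl (pvRelax terrain NN MM PP) terrain
      ([(-1, 0, 0), (1, 0, 0), (0, -1, 0), (0, 1, 0), (0, 0, -1), (0, 0, 1)] : List (Int × Int × Int))) i j k
      = List.foldl (fun mh d => max mh (pvGet3 terrain (i + d.1) (j + d.2.1) (k + d.2.2)))
          (pvGet3 terrain i j k)
          ([(-1, 0, 0), (1, 0, 0), (0, -1, 0), (0, 1, 0), (0, 0, -1), (0, 0, 1)] : List (Int × Int × Int)) := by
    simp only [List.foldl]
    rw [pvSh_get3_relax terrain terrain NN MM PP _ _ i j k sh5 hv_i0 hv_i hv_j0 hv_j hv_k0 hv_k hint,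
        pvSh_get3_relax terrain terrain NN MM PP _ _ i j k sh4 hv_i0 hv_i hv_j0 hv_j hv_k0 hv_k hint,
        pvSh_get3_relax terrain terrain NN MM PP _ _ i j k sh3 hv_i0 hv_i hv_j0 hv_j hv_k0 hv_k hint,
        pvSh_get3_relax terrain terrain NN MM PP _ _ i j k sh2 hv_i0 hv_i hv_j0 hv_j hv_k0 hv_k hint,
        pvSh_get3_relax terrain terrain NN MM PP _ _ i j k sh1 hv_i0 hv_i hv_j0 hv_j hv_k0 hv_k hint,
        pvSh_get3_relax terrain terrain NN MM PP _ _ i j k sh0 hv_i0 hv_i hv_j0 hv_j hv_k0 hv_k hint]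
  rw [hbest, pvIteDiff _ _ _ hle]
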